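-- pv_equiv track=rewrite | github.com/kren1504/Training | vowel_to_index.py | vowel_2_index
-- ===== SOURCE A (Python) =====
-- def vowel_2_index(string):
--     vocales = "AEIOUaeiou"
--     res =""
--
--     for i in range(len(string)):
--         if string[i] in vocales:
--             res+=str(i+1)
--         else:
--             res+=string[i]
--
--     return res
-- ===== SOURCE B (Python) =====
-- def vowel_2_index(string):
--     vowels = "AEIOUaeiou"
--     positions = [i for i, c in enumerate(string) if c in vowels]
--     parts = []
--     prev = 0
--     for i in positions:
--         parts.append(string[prev:i])
--         parts.append(str(i + 1))
--         prev = i + 1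
--     parts.append(string[prev:])
--     return "".join(parts)
-- ===== Notes on version B (the rewrite author's own statement) =====
-- stated objective: alternative
-- what changed: Replaces A's per-character indexed loop (test each char, append digit-string or char) by a two-phase segment splice: first collect the vowel positions, then stitch the untouched inter-vowel slices together with the 1-based position numbers and join once.
import Mathlib
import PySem

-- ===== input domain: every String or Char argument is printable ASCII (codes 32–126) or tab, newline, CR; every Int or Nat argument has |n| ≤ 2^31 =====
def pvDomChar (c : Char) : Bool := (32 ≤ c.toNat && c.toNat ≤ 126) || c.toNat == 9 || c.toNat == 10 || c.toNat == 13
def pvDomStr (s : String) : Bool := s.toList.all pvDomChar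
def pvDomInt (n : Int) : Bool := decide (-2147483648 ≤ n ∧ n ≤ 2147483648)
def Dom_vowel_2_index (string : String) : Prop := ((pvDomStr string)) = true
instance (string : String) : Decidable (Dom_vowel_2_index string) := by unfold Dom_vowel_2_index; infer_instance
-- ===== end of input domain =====

-- B replaces A's per-character indexed loop by a two-phase segment splice (collect vowel
-- positions, then join the untouched slices with the position numbers); objective: alternative.

-- ===== PORT A =====
-- 'string[i] in vocales' is a single-character substring test, exact as list membership.
def vowel_2_index (string : String) : String :=
  let vocales : List Char := "AEIOUaeiou".toList
  let cs := string.toList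
  let res := (PySem.List.pyRange 0 (cs.length : Int) 1).foldl
    (fun res i =>
      if vocales.contains (PySem.List.pyGetD cs i ' ') then
        res ++ PySem.Int.toChars (i + 1)
      else
        res ++ [PySem.List.pyGetD cs i ' ']) []
  String.ofList res

-- ===== PORT B =====
def vowel_2_index_alt (string : String) : String :=
  let vowels : List Char := "AEIOUaeiou".toList
  let cs := string.toList
  let positions := ((PySem.List.enumerate cs 0).filter (fun p => vowels.contains p.2)).map (·.1)
  let st := positions.foldl
    (fun (st : List (List Char) × Int) i =>
      (st.1 ++ [PySem.List.slice cs (some st.2) (some i), PySem.Int.toChars (i + 1)], i + 1))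
    ([], 0)
  String.ofList ((st.1 ++ [PySem.List.slice cs (some st.2) none]).flatten)

-- ===== PRECONDITION & SPEC =====
def Spec_vowel_2_index (string : String) (out : String) : Prop := out = vowel_2_index_alt string
instance (string : String) (out : String) : Decidable (Spec_vowel_2_index string out) := by unfold Spec_vowel_2_index; infer_instance

-- ===== CLAIM (what is proved, stated in full; the proofs are below) =====
def Claim_equal_vowel_2_index : Prop := ∀ (string : String), Dom_vowel_2_index string → Spec_vowel_2_index string (vowel_2_index string)

-- ===== LEMMAS AND PROOFS =====

def pvVow : List Char := "AEIOUaeiou".toList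

-- the intended per-character output, indexed from k
def pvCanon : List Char → Nat → List Char
  | [], _ => []
  | c :: t, k =>
    (if pvVow.contains c then PySem.Int.toChars ((k : Int) + 1) else [c]) ++ pvCanon t (k + 1)

-- vowel positions of cs when its first character has index k
def pvPos : List Char → Nat → List Int
  | [], _ => []
  | c :: t, k => if pvVow.contains c then (k : Int) :: pvPos t (k + 1) else pvPos t (k + 1)

set_option maxRecDepth 8192 in
lemma pvLemA (full : List Char) :
    ∀ n k (acc : List Char), full.length - k = n →
    (PySem.List.pyRange (k : Int) (full.length : Int) 1).foldl
      (fun res i =>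
        if pvVow.contains (PySem.List.pyGetD full i ' ') then
          res ++ PySem.Int.toChars (i + 1)
        else
          res ++ [PySem.List.pyGetD full i ' ']) acc
    = acc ++ pvCanon (full.drop k) k := by
  intro n
  induction n with
  | zero =>
    intro k acc h
    have hk : full.length ≤ k := by omega
    rw [List.drop_eq_nil_of_le hk]
    rw [show PySem.List.pyRange (k : Int) (full.length : Int) 1 = [] from by
      simp [PySem.List.pyRange]; omega]
    simp [pvCanon]
  | succ n ih =>
    intro k acc h
    have hk : k < full.length := by omega
    rw [PySem.List.pyRange_one_cons (by exact_mod_cast hk)]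
    have hdrop : full.drop k = full[k] :: full.drop (k + 1) :=
      List.drop_eq_getElem_cons hk
    rw [hdrop]
    simp only [List.foldl_cons]
    have hget : PySem.List.pyGetD full (k : Int) ' ' = full[k] := by
      rw [PySem.List.pyGetD_natCast]
      exact List.getD_eq_getElem full ' ' hk
    have hcast : ((k : Int) + 1) = ((k + 1 : Nat) : Int) := by push_cast; ring
    rw [hcast]
    rw [ih (k + 1) _ (by omega)]
    rw [hget]
    by_cases hm : full[k] ∈ pvVow <;>
      simp [hm, pvCanon, List.append_assoc]

lemma pvPosEq : ∀ (cs : List Char) (k : Nat),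
    ((PySem.List.enumerate cs (k : Int)).filter (fun p => pvVow.contains p.2)).map (·.1)
      = pvPos cs k := by
  intro cs
  induction cs with
  | nil => intro k; simp [PySem.List.enumerate_nil, pvPos]
  | cons c t ih =>
    intro k
    rw [PySem.List.enumerate_cons]
    have hcast : ((k : Int) + 1) = ((k + 1 : Nat) : Int) := by push_cast; ring
    have h := ih (k + 1)
    simp only [List.contains_eq_mem, Nat.cast_add, Nat.cast_one] at h
    by_cases hm : c ∈ pvVow <;>
      simp [pvPos, hm, h]

lemma pvSegStep (full : List Char) (prev k : Nat) (c : Char) (t : List Char)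
    (hprev : prev ≤ k) (hd : full.drop k = c :: t) :
    (full.take (k + 1)).drop prev = (full.take k).drop prev ++ [c] := by
  have hlen : full.length - k = t.length + 1 := by
    have := congrArg List.length hd
    simp at this
    omega
  have hk : k < full.length := by omega
  have hc : full[k] = c := by
    have h2 := List.drop_eq_getElem_cons hk (l := full)
    rw [hd] at h2
    exact (List.cons.injEq _ _ _ _ ▸ h2).1.symm
  rw [List.take_add_one, List.getElem?_eq_getElem hk, hc]
  simp only [Option.toList_some]
  rw [List.drop_append_of_le_length (by simp [List.length_take]; omega)]

set_option maxRecDepth 8192 in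
lemma pvLemB (full : List Char) :
    ∀ (cs : List Char) (k prev : Nat) (parts : List (List Char)),
    full.drop k = cs → prev ≤ k → k ≤ full.length →
    (((pvPos cs k).foldl
        (fun (st : List (List Char) × Int) i =>
          (st.1 ++ [PySem.List.slice full (some st.2) (some i), PySem.Int.toChars (i + 1)], i + 1))
        (parts, (prev : Int))).1 ++
      [PySem.List.slice full
        (some (((pvPos cs k).foldl
          (fun (st : List (List Char) × Int) i =>
            (st.1 ++ [PySem.List.slice full (some st.2) (some i), PySem.Int.toChars (i + 1)], i + 1))
          (parts, (prev : Int))).2)) none]).flatten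
    = parts.flatten ++ (full.take k).drop prev ++ pvCanon cs k := by
  intro cs
  induction cs with
  | nil =>
    intro k prev parts hdrop hprev hk
    have hlen : full.length ≤ k := by
      have := congrArg List.length hdrop
      simp at this
      omega
    have hkeq : k = full.length := by omega
    simp only [pvPos, List.foldl_nil, pvCanon]
    rw [PySem.List.slice_from_natCast]
    simp [hkeq]
  | cons c t ih =>
    intro k prev parts hdrop hprev hk
    have hk' : k < full.length := by
      have := congrArg List.length hdrop
      simp at this
      omega
    have hdt : full.drop (k + 1) = t := by
      have h1 : full.drop (k + 1) = (full.drop k).drop 1 := by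
        rw [List.drop_drop]
      rw [h1, hdrop]; rfl
    have hcast : ((k : Int) + 1) = ((k + 1 : Nat) : Int) := by push_cast; ring
    by_cases hm : c ∈ pvVow
    · rw [show pvPos (c :: t) k = (k : Int) :: pvPos t (k + 1) from by simp [pvPos, hm]]
      simp only [List.foldl_cons]
      rw [hcast]
      rw [ih (k + 1) (k + 1) _ hdt (le_refl _) (by omega)]
      rw [PySem.List.slice_natCast]
      have hseg : (full.drop prev).take (k - prev) = (full.take k).drop prev := by
        rw [List.drop_take]
      simp [hseg, pvCanon, hm, List.append_assoc]
    · rw [show pvPos (c :: t) k = pvPos t (k + 1) from by simp [pvPos, hm]]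
      rw [ih (k + 1) prev parts hdt (by omega) (by omega)]
      rw [pvSegStep full prev k c t hprev hdrop]
      simp [pvCanon, hm, List.append_assoc]

-- ===== VERDICT (by name: the statement is the Claim_ definition above) =====
set_option maxRecDepth 8192 in
theorem vowel_2_index_spec : Claim_equal_vowel_2_index := by
  intro s _
  unfold Spec_vowel_2_index vowel_2_index vowel_2_index_alt
  simp only []
  rw [show ("AEIOUaeiou".toList : List Char) = pvVow from rfl]
  have hA := pvLemA s.toList s.toList.length 0 [] (by omega)
  have hPos := pvPosEq s.toList 0
  have hB := pvLemB s.toList s.toList 0 0 [] rfl (Nat.le_refl 0) (Nat.zero_le _)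
  simp only [Nat.cast_zero] at hA hPos hB
  rw [hA, hPos, hB]
  simp
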